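-- pv_equiv track=rewrite | github.com/jcisio/adventofcode2020 | day14/d14.py | applyInstruction
-- ===== SOURCE A (Python) =====
-- def applyInstruction(memory, mask, name, value):
--     address = name[4:-1]
--     data = 0
--     multiplier = 1
--     for bitmask in mask[-1::-1]:
--         bit = value % 2
--         value = value // 2
--         if bitmask != 'X':
--             bit = int(bitmask)
--         data = data + bit*multiplier
--         multiplier *= 2
--     memory[address] = data
--     return memory
-- ===== SOURCE B (Python) =====
-- def applyInstruction(memory, mask, name, value):
--     n = len(mask)
--     data = 0
--     for i, c in enumerate(mask):
--         data = 2 * data + (value // 2 ** (n - 1 - i) % 2 if c == 'X' else int(c))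
--     memory[name[4:-1]] = data
--     return memory
-- ===== Notes on version B (the rewrite author's own statement) =====
-- stated objective: alternative
-- what changed: B replaces A's right-to-left accumulation (mutating value by repeated halving while maintaining a running multiplier) with a single left-to-right Horner pass that extracts each 'X' bit directly as value // 2**(n-1-i) % 2; no running value/multiplier state is kept.
import Mathlib
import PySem

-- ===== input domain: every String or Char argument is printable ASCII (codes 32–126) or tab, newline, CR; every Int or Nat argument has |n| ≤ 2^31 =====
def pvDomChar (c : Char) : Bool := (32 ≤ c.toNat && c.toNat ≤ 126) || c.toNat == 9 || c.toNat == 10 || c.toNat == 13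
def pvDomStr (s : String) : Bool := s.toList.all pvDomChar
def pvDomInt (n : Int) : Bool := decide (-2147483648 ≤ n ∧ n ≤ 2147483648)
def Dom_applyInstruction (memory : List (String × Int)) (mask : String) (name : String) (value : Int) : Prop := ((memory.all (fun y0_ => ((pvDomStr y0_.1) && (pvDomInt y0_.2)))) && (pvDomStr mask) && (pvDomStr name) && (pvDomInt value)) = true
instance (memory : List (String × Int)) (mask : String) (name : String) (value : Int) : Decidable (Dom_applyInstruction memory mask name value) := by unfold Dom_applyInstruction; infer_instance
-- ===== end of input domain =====

-- B computes the stored word by a left-to-right Horner pass extracting bits of `value`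
-- directly by power division, instead of A's right-to-left halving loop with a running
-- multiplier; objective: alternative (same cost, different algorithm).

-- ===== PORT A =====
-- loop body of A: bit = value % 2; value //= 2; if bitmask != 'X': bit = int(bitmask); data += bit*multiplier; multiplier *= 2
-- state = (data, value, multiplier).  int(bitmask) raises ValueError for a non-digit char
-- (PySem.Int.ofChars? = none there); such masks are outside Pre_, `.getD 0` is unreached on Pre_.
def pvStepA : (Int × Int × Int) → Char → (Int × Int × Int) := fun s c =>
  let bit := PySem.Int.mod s.2.1 2
  let v2 := PySem.Int.floordiv s.2.1 2
  let bit := if c ≠ 'X' then (PySem.Int.ofChars? [c]).getD 0 else bit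
  (s.1 + bit * s.2.2, v2, s.2.2 * 2)

def applyInstruction (memory : List (String × Int)) (mask : String) (name : String) (value : Int) : List (String × Int) :=
  -- address = name[4:-1]
  let address : String := PySem.Str.slice name (some 4) (some (-1))
  -- mask[-1::-1]  (slice? is none only for step 0, so .getD [] is unreached)
  let rev : List Char := (PySem.List.slice? mask.toList (some (-1)) none (-1)).getD []
  let st := rev.foldl pvStepA (0, value, 1)
  -- memory[address] = data; return memory
  ((PySem.Dict.mk memory).insert address st.1).items

-- ===== PORT B =====
-- loop body of B: data = 2*data + (value // 2**(n-1-i) % 2 if c == 'X' else int(c));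
-- inside the loop 0 ≤ n-1-i, so `(n-1-i).toNat` is exact for Python's 2**(n-1-i).
def pvStepB (value n : Int) : Int → (Int × Char) → Int := fun d ic =>
  2 * d + (if ic.2 = 'X' then PySem.Int.mod (PySem.Int.floordiv value (2 ^ (n - 1 - ic.1).toNat)) 2
           else (PySem.Int.ofChars? [ic.2]).getD 0)

def applyInstruction_alt (memory : List (String × Int)) (mask : String) (name : String) (value : Int) : List (String × Int) :=
  let n : Int := PySem.Str.len mask
  let data := (PySem.List.enumerate mask.toList 0).foldl (pvStepB value n) 0
  ((PySem.Dict.mk memory).insert (PySem.Str.slice name (some 4) (some (-1))) data).items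

-- ===== PRECONDITION & SPEC =====
-- Pre_ excludes exactly the masks containing a character that is neither 'X' nor a decimal
-- digit: there Python A raises ValueError at int(bitmask) (and Python B raises at int(c) too).
def Pre_applyInstruction (memory : List (String × Int)) (mask : String) (name : String) (value : Int) : Prop :=
  mask.toList.all (fun c => c == 'X' || c.isDigit) = true
instance (memory : List (String × Int)) (mask : String) (name : String) (value : Int) : Decidable (Pre_applyInstruction memory mask name value) := by unfold Pre_applyInstruction; infer_instance

def pvWitness_applyInstruction : (List (String × Int)) × String × String × Int := ([("8", 11)], "X10X", "mem[8]", 11)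

def Spec_applyInstruction (memory : List (String × Int)) (mask : String) (name : String) (value : Int) (out : List (String × Int)) : Prop := out = applyInstruction_alt memory mask name value
instance (memory : List (String × Int)) (mask : String) (name : String) (value : Int) (out : List (String × Int)) : Decidable (Spec_applyInstruction memory mask name value out) := by unfold Spec_applyInstruction; infer_instance

-- ===== CLAIM (what is proved, stated in full; the proofs are below) =====
def Claim_equal_applyInstruction : Prop := ∀ (memory : List (String × Int)) (mask : String) (name : String) (value : Int), Dom_applyInstruction memory mask name value → Pre_applyInstruction memory mask name value → Spec_applyInstruction memory mask name value (applyInstruction memory mask name value)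

-- ===== LEMMAS AND PROOFS =====

-- floor-division by successive powers of two composes
theorem pv_fdiv_fdiv (v a b : Int) (ha : 0 < a) (hb : 0 < b) :
    PySem.Int.floordiv (PySem.Int.floordiv v a) b = PySem.Int.floordiv v (a * b) := by
  rw [PySem.Int.floordiv_eq_ediv_of_pos ha, PySem.Int.floordiv_eq_ediv_of_pos hb,
      PySem.Int.floordiv_eq_ediv_of_pos (by positivity)]
  exact Int.ediv_ediv_of_nonneg (le_of_lt ha)

-- mask[-1::-1] is the reversed character list
theorem pv_slice_neg_one_rev {α : Type} (xs : List α) :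
    PySem.List.slice? xs (some (-1)) none (-1) = some xs.reverse := by
  have h : PySem.List.sliceIndices xs.length (some (-1)) none (-1)
      = PySem.List.sliceIndices xs.length none none (-1) := by
    simp [PySem.List.sliceIndices]; omega
  rw [PySem.List.slice?, h, ← PySem.List.slice?]
  exact PySem.List.slice?_none_none_neg_one xs

-- the bit A contributes for a mask character, at the current (already halved) value
def pvBitA (v : Int) (c : Char) : Int :=
  if c ≠ 'X' then (PySem.Int.ofChars? [c]).getD 0 else PySem.Int.mod v 2

-- A's accumulated word over an lsb-first character list
def pvD : List Char → Int → Int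
  | [], _ => 0
  | c :: m, v => pvBitA v c + 2 * pvD m (PySem.Int.floordiv v 2)

-- the bit B contributes at absolute exponent e
def pvBitB (value e : Int) (c : Char) : Int :=
  if c = 'X' then PySem.Int.mod (PySem.Int.floordiv value (2 ^ e.toNat)) 2
  else (PySem.Int.ofChars? [c]).getD 0

-- B's Horner value over an msb-first character list whose head has exponent e
def pvH (value : Int) : List Char → Int → Int
  | [], _ => 0
  | c :: l, e => pvBitB value e c * 2 ^ l.length + pvH value l (e - 1)

theorem pvStepA_fold (m : List Char) : ∀ (d0 v mult : Int),
    (m.foldl pvStepA (d0, v, mult)).1 = d0 + mult * pvD m v := by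
  induction m with
  | nil => intro d0 v mult; simp [pvD]
  | cons c m ih =>
    intro d0 v mult
    simp only [List.foldl_cons, pvStepA, pvD, ih, pvBitA]
    ring

theorem pvStepB_fold (value n : Int) (l : List Char) : ∀ (s d0 : Int),
    (PySem.List.enumerate l s).foldl (pvStepB value n) d0
      = d0 * 2 ^ l.length + pvH value l (n - 1 - s) := by
  induction l with
  | nil => intro s d0; simp [pvH, PySem.List.enumerate_nil]
  | cons c l ih =>
    intro s d0
    rw [PySem.List.enumerate_cons]
    simp only [List.foldl_cons, ih (s + 1)]
    simp only [pvStepB, pvH, pvBitB, List.length_cons]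
    have : n - 1 - (s + 1) = n - 1 - s - 1 := by ring
    rw [this]
    ring

theorem pvD_append (c : Char) (m : List Char) : ∀ (v : Int),
    pvD (m ++ [c]) v
      = pvD m v + 2 ^ m.length * pvBitA (PySem.Int.floordiv v (2 ^ m.length)) c := by
  induction m with
  | nil =>
    intro v
    simp [pvD]
  | cons d m ih =>
    intro v
    have h2 : PySem.Int.floordiv (PySem.Int.floordiv v 2) (2 ^ m.length)
        = PySem.Int.floordiv v (2 ^ (m.length + 1)) := by
      rw [pv_fdiv_fdiv v 2 (2 ^ m.length) (by norm_num) (by positivity), ← pow_succ']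
    simp only [List.cons_append, pvD, ih, h2, List.length_cons]
    ring

theorem pvH_eq_pvD (value : Int) (l : List Char) :
    pvH value l ((l.length : Int) - 1) = pvD l.reverse value := by
  induction l with
  | nil => simp [pvH, pvD]
  | cons c l ih =>
    have hbit : pvBitB value (l.length : Int) c
        = pvBitA (PySem.Int.floordiv value (2 ^ l.length)) c := by
      by_cases hc : c = 'X' <;> simp [pvBitA, pvBitB, hc]
    simp only [pvH, List.length_cons, List.reverse_cons, pvD_append,
      List.length_reverse]
    rw [show ((l.length + 1 : Nat) : Int) - 1 = (l.length : Int) by push_cast; ring, hbit,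
        ih]
    ring

-- ===== VERDICT (by name: the statement is the Claim_ definition above) =====
theorem applyInstruction_spec : Claim_equal_applyInstruction := by
  intro memory mask name value _hDom _hPre
  unfold Spec_applyInstruction applyInstruction applyInstruction_alt
  rw [pv_slice_neg_one_rev]
  simp only [Option.getD_some, pvStepA_fold, pvStepB_fold, PySem.Str.len_eq]
  rw [show (mask.toList.length : Int) - 1 - 0 = (mask.toList.length : Int) - 1 by ring,
      pvH_eq_pvD]
  ring_nf
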